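-- pv_equiv track=rewrite | github.com/liu-bluesky/AI-Native | web-admin/api/routers/employees.py | _format_rule_domain_summary
-- ===== SOURCE A (Python) =====
-- def _format_rule_domain_summary(rule_bindings: list[dict[str, str]]) -> str:
--     grouped: dict[str, list[dict[str, str]]] = {}
--     for item in rule_bindings:
--         domain = str(item.get("domain", "") or "").strip() or "未分类"
--         grouped.setdefault(domain, []).append(item)
--     if not grouped:
--         return "无"
--
--     lines: list[str] = []
--     for domain in sorted(grouped):
--         items = grouped[domain]
--         labels = [
--             f"{str(rule.get('title', '') or '').strip() or str(rule.get('id', '') or '').strip() or '未命名规则'} (`{str(rule.get('id', '') or '').strip() or 'unknown-rule'}`)"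
--             for rule in items
--         ]
--         lines.append(f"- {domain}：{'；'.join(labels)}")
--     return "\n".join(lines)
-- ===== SOURCE B (Python) =====
-- def _domain_of(item):
--     return str(item.get("domain", "") or "").strip() or "未分类"
--
--
-- def _label_of(rule):
--     rid = str(rule.get("id", "") or "").strip()
--     title = str(rule.get("title", "") or "").strip() or rid or "未命名规则"
--     return f"{title} (`{rid or 'unknown-rule'}`)"
--
--
-- def _format_rule_domain_summary(rule_bindings: list[dict[str, str]]) -> str:
--     if not rule_bindings:
--         return "无"
--     domains = sorted({_domain_of(item) for item in rule_bindings})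
--     return "\n".join(
--         f"- {d}：{'；'.join(_label_of(r) for r in rule_bindings if _domain_of(r) == d)}"
--         for d in domains
--     )
-- ===== Notes on version B (the rewrite author's own statement) =====
-- stated objective: simpler
-- what changed: Replaces the dict-of-lists grouping pass with sorting the set of domain keys and selecting each domain's bindings by a direct filter over the input, expressed as two comprehensions.
import Mathlib
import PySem

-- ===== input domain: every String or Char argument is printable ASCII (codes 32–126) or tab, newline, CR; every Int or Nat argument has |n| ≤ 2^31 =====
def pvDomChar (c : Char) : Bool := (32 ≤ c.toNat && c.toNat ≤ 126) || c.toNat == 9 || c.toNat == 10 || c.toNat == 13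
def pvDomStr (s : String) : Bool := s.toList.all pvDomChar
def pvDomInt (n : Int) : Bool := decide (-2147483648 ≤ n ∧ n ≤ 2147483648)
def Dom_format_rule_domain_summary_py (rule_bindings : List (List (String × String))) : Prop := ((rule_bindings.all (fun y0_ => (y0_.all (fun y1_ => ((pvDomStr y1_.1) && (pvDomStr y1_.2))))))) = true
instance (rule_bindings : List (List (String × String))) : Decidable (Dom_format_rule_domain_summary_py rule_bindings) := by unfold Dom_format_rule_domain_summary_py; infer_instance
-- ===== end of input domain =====

-- B replaces A's dict-of-lists grouping with sorting the set of domain keys and a per-domain filter (simpler decomposition, not faster).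

-- shared normalization (both Pythons contain these exact expressions):
-- str(item.get("domain", "") or "").strip() or "未分类"
def pvGroupKey (item : List (String × String)) : String :=
  let s := PySem.Str.strip ((PySem.Dict.mk item).getD "domain" "")
  if s = "" then "未分类" else s

-- the label f-string: title-or-id-or-default, then " (`" id-or-default "`)"
def pvLabelOf (rule : List (String × String)) : String :=
  let rid := PySem.Str.strip ((PySem.Dict.mk rule).getD "id" "")
  let title := PySem.Str.strip ((PySem.Dict.mk rule).getD "title" "")
  (if title = "" then (if rid = "" then "未命名规则" else rid) else title) ++
    " (`" ++ (if rid = "" then "unknown-rule" else rid) ++ "`)"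

-- ===== PORT A =====
def format_rule_domain_summary_py (rule_bindings : List (List (String × String))) : String :=
  let grouped : PySem.Dict String (List (List (String × String))) :=
    rule_bindings.foldl (fun d item => d.modify (pvGroupKey item) [] (· ++ [item])) PySem.Dict.empty
  if grouped.items = [] then "无"
  else
    let lines := (PySem.List.sorted grouped.keys (fun x => x) false).map (fun domain =>
      "- " ++ domain ++ "：" ++ PySem.Str.join "；" ((grouped.getD domain []).map pvLabelOf))
    PySem.Str.join "\n" lines

-- ===== PORT B =====
def format_rule_domain_summary_py_alt (rule_bindings : List (List (String × String))) : String :=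
  if rule_bindings = [] then "无"
  else
    let domains := PySem.List.sorted (PySem.Set.ofList (rule_bindings.map pvGroupKey)) (fun x => x) false
    PySem.Str.join "\n" (domains.map (fun d =>
      "- " ++ d ++ "：" ++
        PySem.Str.join "；" ((rule_bindings.filter (fun r => pvGroupKey r == d)).map pvLabelOf)))

-- ===== PRECONDITION & SPEC =====
def Spec_format_rule_domain_summary_py (rule_bindings : List (List (String × String))) (out : String) : Prop := out = format_rule_domain_summary_py_alt rule_bindings
instance (rule_bindings : List (List (String × String))) (out : String) : Decidable (Spec_format_rule_domain_summary_py rule_bindings out) := by unfold Spec_format_rule_domain_summary_py; infer_instance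

-- ===== CLAIM (what is proved, stated in full; the proofs are below) =====
def Claim_equal_format_rule_domain_summary_py : Prop := ∀ (rule_bindings : List (List (String × String))), Dom_format_rule_domain_summary_py rule_bindings → Spec_format_rule_domain_summary_py rule_bindings (format_rule_domain_summary_py rule_bindings)

-- ===== LEMMAS AND PROOFS =====

-- the grouping dict's keys are the distinct domains in first-occurrence order
theorem pv_keys (rb : List (List (String × String))) :
    (rb.foldl (fun d item => d.modify (pvGroupKey item) [] (· ++ [item]))
      (PySem.Dict.empty : PySem.Dict String (List (List (String × String))))).keys
      = PySem.Set.ofList (rb.map pvGroupKey) := by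
  rw [PySem.Dict.keys_foldl_modify_key]
  rfl

-- the grouping dict's entry at c is the filter of the input at domain c
theorem pv_getD (rb : List (List (String × String))) (c : String) :
    (rb.foldl (fun d item => d.modify (pvGroupKey item) [] (· ++ [item]))
      (PySem.Dict.empty : PySem.Dict String (List (List (String × String))))).getD c []
      = rb.filter (fun it => pvGroupKey it == c) := by
  have h : rb.foldl (fun d item => d.modify (pvGroupKey item) [] (· ++ [item]))
      (PySem.Dict.empty : PySem.Dict String (List (List (String × String))))
      = (rb.map (fun it => (pvGroupKey it, it))).foldl
          (fun d p => d.modify p.1 [] (· ++ [p.2])) PySem.Dict.empty := by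
    rw [List.foldl_map]
  rw [h, PySem.Dict.getD_foldl_modify_append]
  simp [List.filter_map, List.map_map, Function.comp_def]

set_option maxHeartbeats 1000000 in
theorem format_rule_domain_summary_py_spec_aux (rb : List (List (String × String))) :
    format_rule_domain_summary_py rb = format_rule_domain_summary_py_alt rb := by
  cases rb with
  | nil => rfl
  | cons a t =>
      have hne : ((a :: t).foldl (fun d item => d.modify (pvGroupKey item) [] (· ++ [item]))
          (PySem.Dict.empty : PySem.Dict String (List (List (String × String))))).items ≠ [] := by
        intro h
        have hkeys : ((a :: t).foldl (fun d item => d.modify (pvGroupKey item) [] (· ++ [item]))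
            (PySem.Dict.empty : PySem.Dict String (List (List (String × String))))).keys = [] := by
          simp only [PySem.Dict.keys, h, List.map_nil]
        rw [pv_keys] at hkeys
        have hmem : pvGroupKey a ∈ (PySem.Set.ofList ((a :: t).map pvGroupKey) : List String) := by
          rw [PySem.Set.mem_ofList]
          simp
        rw [hkeys] at hmem
        exact (List.not_mem_nil).elim hmem
      show (if _ = ([] : List (String × List (List (String × String)))) then _ else _) = _
      rw [if_neg hne]
      unfold format_rule_domain_summary_py_alt
      rw [if_neg (List.cons_ne_nil a t)]
      rw [pv_keys]
      refine congrArg (PySem.Str.join "\n") (List.map_congr_left ?_)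
      intro d _
      rw [pv_getD]

-- ===== VERDICT (by name: the statement is the Claim_ definition above) =====
theorem format_rule_domain_summary_py_spec : Claim_equal_format_rule_domain_summary_py := by
  intro rb _
  exact format_rule_domain_summary_py_spec_aux rb
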